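-- pv_equiv track=rewrite | github.com/VoropaevIvan/EGE | course/27 Анализ данных/line/27 А Линия.py | find_centre
-- ===== SOURCE A (Python) =====
-- def find_centre(cluster):  # Функция получает на вход кластер и возвращает его центр.
--     min_sum = 10 ** 10  # Минимальная сумма расстояний от точки до всех остальных точек
--     centre = [-1, -1]   # Центр кластера
--
--     n = len(cluster)  # Количество точек в кластере
--     sum_x = sum([x for x, y in cluster])  # Сумма кординат x всех точек: x1 + x2 + ... + xn
--     sum_y = sum([y for x, y in cluster])  # Сумма кординат y всех точек: y1 + y2 + ... + yn
--     # Сумма x^2 и y^2 всех точек: (x1^2 + x2^2 + ... + xn^2) + (y1^2 + y2^2 + ... + yn^2)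
--     sum_kv_x_y = sum([x**2 + y**2 for x, y in cluster])
--
--     for x, y in cluster:  # Перебираем все точки кластера
--         # Для текущей точки по формуле считаем сумму расстояний до всех других точек
--         cur_sum = ((x**2+y**2) * n) + sum_kv_x_y - 2*x*sum_x - 2*y*sum_y
--         if cur_sum < min_sum:  # Если сумма расстояний от текущей точки до всех других точек минимальна
--             min_sum = cur_sum  # То запоминаем значение суммы растояний
--             centre = [x, y]    # И координаты текущей точки
--     return centre
-- ===== SOURCE B (Python) =====
-- def find_centre(cluster):
--     min_sum = 10 ** 10
--     centre = [-1, -1]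
--     for x, y in cluster:
--         cur_sum = sum((x - xj) ** 2 + (y - yj) ** 2 for xj, yj in cluster)
--         if cur_sum < min_sum:
--             min_sum = cur_sum
--             centre = [x, y]
--     return centre
-- ===== Notes on version B (the rewrite author's own statement) =====
-- stated objective: simpler
-- what changed: Replaces A's precomputed algebraic identity (sum_x/sum_y/sum_kv_x_y and a closed-form cur_sum) with a direct naive double scan that sums the squared distances from each point to all points.
import Mathlib
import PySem

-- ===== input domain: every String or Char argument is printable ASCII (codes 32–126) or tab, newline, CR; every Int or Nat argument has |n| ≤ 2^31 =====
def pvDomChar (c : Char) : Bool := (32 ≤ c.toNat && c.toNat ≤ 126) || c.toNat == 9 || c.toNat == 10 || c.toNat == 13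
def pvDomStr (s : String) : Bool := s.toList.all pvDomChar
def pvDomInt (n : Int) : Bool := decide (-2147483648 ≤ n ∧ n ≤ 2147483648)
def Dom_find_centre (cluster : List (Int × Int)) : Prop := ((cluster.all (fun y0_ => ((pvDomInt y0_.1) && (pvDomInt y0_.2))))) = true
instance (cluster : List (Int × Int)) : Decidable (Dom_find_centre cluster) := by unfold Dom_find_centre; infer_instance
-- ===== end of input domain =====

-- B replaces A's precomputed closed-form distance sum with a direct naive double scan (simpler, O(n^2) vs O(n)).


-- ===== PORT A =====
def find_centre (cluster : List (Int × Int)) : List Int :=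
  let n : Int := cluster.length
  let sum_x : Int := (cluster.map (fun p => p.1)).sum
  let sum_y : Int := (cluster.map (fun p => p.2)).sum
  let sum_kv_x_y : Int := (cluster.map (fun p => p.1 ^ 2 + p.2 ^ 2)).sum
  (cluster.foldl
    (fun (st : Int × List Int) p =>
      let cur_sum := (p.1 ^ 2 + p.2 ^ 2) * n + sum_kv_x_y - 2 * p.1 * sum_x - 2 * p.2 * sum_y
      if cur_sum < st.1 then (cur_sum, [p.1, p.2]) else st)
    (10 ^ 10, [-1, -1])).2

-- ===== PORT B =====
def find_centre_alt (cluster : List (Int × Int)) : List Int :=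
  (cluster.foldl
    (fun (st : Int × List Int) p =>
      let cur_sum := (cluster.map (fun q => (p.1 - q.1) ^ 2 + (p.2 - q.2) ^ 2)).sum
      if cur_sum < st.1 then (cur_sum, [p.1, p.2]) else st)
    (10 ^ 10, [-1, -1])).2

-- ===== PRECONDITION & SPEC =====
def Spec_find_centre (cluster : List (Int × Int)) (out : List Int) : Prop := out = find_centre_alt cluster
instance (cluster : List (Int × Int)) (out : List Int) : Decidable (Spec_find_centre cluster out) := by unfold Spec_find_centre; infer_instance

-- ===== CLAIM (what is proved, stated in full; the proofs are below) =====
def Claim_equal_find_centre : Prop := ∀ (cluster : List (Int × Int)), Dom_find_centre cluster → Spec_find_centre cluster (find_centre cluster)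

-- ===== LEMMAS AND PROOFS =====

/-- The naive sum of squared distances from (x,y) to all points equals A's closed form. -/
theorem sq_dist_sum (x y : Int) (cluster : List (Int × Int)) :
    (cluster.map (fun q => (x - q.1) ^ 2 + (y - q.2) ^ 2)).sum =
      (x ^ 2 + y ^ 2) * cluster.length + (cluster.map (fun p => p.1 ^ 2 + p.2 ^ 2)).sum
        - 2 * x * (cluster.map (fun p => p.1)).sum - 2 * y * (cluster.map (fun p => p.2)).sum := by
  induction cluster with
  | nil => simp
  | cons h t ih =>
    simp only [List.map_cons, List.sum_cons, List.length_cons, ih]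
    push_cast
    ring

-- ===== VERDICT (by name: the statement is the Claim_ definition above) =====
theorem find_centre_spec : Claim_equal_find_centre := by
  intro cluster _
  unfold Spec_find_centre find_centre find_centre_alt
  simp only [sq_dist_sum]
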